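-- pv_equiv track=rewrite | github.com/rancidGUI/rancid | reader_writer/reader.py | rewrite_out
-- ===== SOURCE A (Python) =====
-- def rewrite_out(content):
--     arr = []
--     all_machines = []
--     for line in content:
--         for pair in zip(['Name','Type', 'State'], line):
--             arr.append(pair)
--             a = dict(arr)
--         all_machines.append(a)
--     return all_machines
-- ===== SOURCE B (Python) =====
-- def rewrite_out(content):
--     keys = ['Name', 'Type', 'State']
--     current = {}
--     all_machines = []
--     for line in content:
--         for key, value in zip(keys, line):
--             current[key] = value
--         all_machines.append(dict(current))
--     return all_machines
-- ===== Notes on version B (the rewrite author's own statement) =====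
-- stated objective: faster
-- what changed: Instead of appending every pair to one ever-growing list and rebuilding dict(arr) from scratch after each pair, B maintains one running dict, updates the keys present in each line, and appends a copy per line.
import Mathlib
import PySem

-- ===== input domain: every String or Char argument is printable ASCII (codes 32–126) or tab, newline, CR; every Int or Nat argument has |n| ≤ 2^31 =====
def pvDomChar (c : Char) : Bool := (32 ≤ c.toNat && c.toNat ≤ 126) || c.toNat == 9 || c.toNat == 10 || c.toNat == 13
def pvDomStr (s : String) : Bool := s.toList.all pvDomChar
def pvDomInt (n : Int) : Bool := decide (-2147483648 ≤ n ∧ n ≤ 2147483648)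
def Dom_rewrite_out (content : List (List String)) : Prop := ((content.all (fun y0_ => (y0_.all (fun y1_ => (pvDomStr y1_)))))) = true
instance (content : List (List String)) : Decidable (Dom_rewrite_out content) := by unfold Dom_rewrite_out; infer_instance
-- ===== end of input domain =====

-- B replaces A's quadratic "append every pair to one list and rebuild dict(arr) each time"
-- with a single running dict updated per line (objective: faster, asymptotic).


-- ===== PORT A =====
def pvKeys : List String := ["Name", "Type", "State"]

-- inner 'for pair in zip(...): arr.append(pair); a = dict(arr)'
def pvStepA_inner (p : List (String × String) × Option (PySem.Dict String String))
    (pair : String × String) : List (String × String) × Option (PySem.Dict String String) :=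
  let arr := p.1 ++ [pair]
  (arr, some (PySem.Dict.ofList arr))

-- one line of A's outer loop; 'a' is Option: none = Python's unassigned 'a' (NameError, outside Pre_)
def pvStepA (st : List (String × String) × Option (PySem.Dict String String) × List (List (String × String)))
    (line : List String) :
    List (String × String) × Option (PySem.Dict String String) × List (List (String × String)) :=
  let inner := (List.zip pvKeys line).foldl pvStepA_inner (st.1, st.2.1)
  (inner.1, inner.2, st.2.2 ++ [(inner.2.getD PySem.Dict.empty).items])

def rewrite_out (content : List (List String)) : List (List (String × String)) :=
  (content.foldl pvStepA ([], none, [])).2.2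

-- ===== PORT B =====
def pvStepB (st : PySem.Dict String String × List (List (String × String)))
    (line : List String) : PySem.Dict String String × List (List (String × String)) :=
  let d := (List.zip pvKeys line).foldl (fun d pair => d.insert pair.1 pair.2) st.1
  (d, st.2 ++ [d.items])

def rewrite_out_alt (content : List (List String)) : List (List (String × String)) :=
  (content.foldl pvStepB (PySem.Dict.empty, [])).2

-- ===== PRECONDITION & SPEC =====
-- Pre_ excludes exactly the inputs whose first line is empty: there A raises NameError
-- (it appends the never-assigned variable 'a').
def Pre_rewrite_out (content : List (List String)) : Prop :=
  content.head? ≠ some ([] : List String)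
instance (content : List (List String)) : Decidable (Pre_rewrite_out content) := by
  unfold Pre_rewrite_out; infer_instance

def pvWitness_rewrite_out : List (List String) := [["r1", "cisco"], ["r2", "juniper", "up"]]

def Spec_rewrite_out (content : List (List String)) (out : List (List (String × String))) : Prop := out = rewrite_out_alt content
instance (content : List (List String)) (out : List (List (String × String))) : Decidable (Spec_rewrite_out content out) := by unfold Spec_rewrite_out; infer_instance

-- ===== CLAIM (what is proved, stated in full; the proofs are below) =====
def Claim_equal_rewrite_out : Prop := ∀ (content : List (List String)), Dom_rewrite_out content → Pre_rewrite_out content → Spec_rewrite_out content (rewrite_out content)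

-- ===== LEMMAS AND PROOFS =====

-- abbreviation used only by the proofs: folding inserts over a pair list
def pvIns (d : PySem.Dict String String) (p : String × String) : PySem.Dict String String :=
  d.insert p.1 p.2

lemma ofList_eq_foldl (l : List (String × String)) :
    PySem.Dict.ofList l = l.foldl pvIns PySem.Dict.empty := rfl

lemma innerA_eq (z : List (String × String)) (arr : List (String × String))
    (a? : Option (PySem.Dict String String)) :
    z.foldl pvStepA_inner (arr, a?) =
      (arr ++ z, if z.isEmpty then a? else some (PySem.Dict.ofList (arr ++ z))) := by
  induction z generalizing arr a? with
  | nil => simp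
  | cons p z ih =>
      simp only [List.foldl_cons, pvStepA_inner, ih (arr ++ [p])]
      by_cases hz : z.isEmpty
      · simp [List.isEmpty_iff.mp hz]
      · simp [hz]

-- main loop invariant: once 'a' is assigned and equals dict(arr), the two loops agree
lemma loop_eq (content : List (List String)) (arr : List (String × String))
    (out : List (List (String × String))) :
    (content.foldl pvStepA (arr, some (PySem.Dict.ofList arr), out)).2.2 =
      (content.foldl pvStepB (arr.foldl pvIns PySem.Dict.empty, out)).2 := by
  induction content generalizing arr out with
  | nil => rfl
  | cons line rest ih =>
      simp only [List.foldl_cons]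
      have hB : (List.zip pvKeys line).foldl (fun d pair => d.insert pair.1 pair.2)
          (arr.foldl pvIns PySem.Dict.empty) =
          (arr ++ List.zip pvKeys line).foldl pvIns PySem.Dict.empty := by
        rw [List.foldl_append]; rfl
      by_cases hz : (List.zip pvKeys line).isEmpty
      · have hz' : List.zip pvKeys line = [] := by
          cases h : List.zip pvKeys line <;> simp_all
        simp only [pvStepA, pvStepB, hz', List.foldl_nil, Option.getD_some]
        rw [ih arr, ofList_eq_foldl]
      · simp only [pvStepA, pvStepB, innerA_eq, hz, Bool.false_eq_true, if_false,
          Option.getD_some, hB]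
        rw [ih (arr ++ List.zip pvKeys line), ofList_eq_foldl]

-- ===== VERDICT (by name: the statement is the Claim_ definition above) =====
theorem rewrite_out_spec : Claim_equal_rewrite_out := by
  intro content _ hpre
  unfold Spec_rewrite_out rewrite_out rewrite_out_alt
  cases content with
  | nil => rfl
  | cons line rest =>
      have hline : line ≠ [] := by
        simpa [Pre_rewrite_out] using hpre
      have hz : (List.zip pvKeys line).isEmpty = false := by
        cases line with
        | nil => exact absurd rfl hline
        | cons x xs => rfl
      simp only [List.foldl_cons, pvStepA, pvStepB, innerA_eq, hz, Bool.false_eq_true,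
        if_false, Option.getD_some, List.nil_append]
      have hB : (List.zip pvKeys line).foldl (fun d pair => d.insert pair.1 pair.2)
          PySem.Dict.empty = (List.zip pvKeys line).foldl pvIns PySem.Dict.empty := rfl
      rw [hB, ← ofList_eq_foldl]
      exact loop_eq rest (List.zip pvKeys line) _
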